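-- pv_equiv track=rewrite | github.com/mtmy2/MyYaPract | 4 Алгоритмы и структура данных/4.8 Проект Служба доставки.py | pl_qty
-- ===== SOURCE A (Python) =====
-- def pl_qty(robots_list: list[int], limit: int) -> int:
--     '''
--     Функция создана для подсчет минимального и достаточного количества
--     платформ для перевозки роботов в количестве равному количеству элементов
--     массива robots_list, каждый элемент содержит вес робота.
--     Общий вес одного или двух роботов на платформе не должен превышать limit
--     '''
--     robots_list = sorted(robots_list, reverse=True)
--     i = 0
--     platforms = 0
--     start_length = len(robots_list)
--     while i < start_length-1 and len(robots_list)>1: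
--         a = 1
--         while a < len(robots_list):
--             weight_sum = robots_list[0] + robots_list[a]
--             if weight_sum <= limit:
--                 platforms += 1
--                 list.remove(robots_list, robots_list[0])
--                 list.remove(robots_list, robots_list[a-1])
--             elif weight_sum > limit and a == len(robots_list)-1:
--                 platforms += 1
--                 list.remove(robots_list, robots_list[0])
--             a += 1
--         i += 1
--     if len(robots_list) == 1:
--         platforms += 1
--     return platforms
-- ===== SOURCE B (Python) =====
-- def pl_qty(robots_list: list[int], limit: int) -> int:
--     s = sorted(robots_list, reverse=True)
--     platforms = 0
--     i, j = 0, len(s) - 1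
--     while i <= j:
--         if i < j and s[i] + s[j] <= limit:
--             j -= 1
--         i += 1
--         platforms += 1
--     return platforms
-- ===== Notes on version B (the rewrite author's own statement) =====
-- stated objective: faster
-- what changed: A repeatedly rescans and mutates the sorted list with nested while loops and list.remove calls; B sorts once descending and counts platforms with a single two-pointer sweep pairing the heaviest remaining robot with the lightest one when they fit.
import Mathlib
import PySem

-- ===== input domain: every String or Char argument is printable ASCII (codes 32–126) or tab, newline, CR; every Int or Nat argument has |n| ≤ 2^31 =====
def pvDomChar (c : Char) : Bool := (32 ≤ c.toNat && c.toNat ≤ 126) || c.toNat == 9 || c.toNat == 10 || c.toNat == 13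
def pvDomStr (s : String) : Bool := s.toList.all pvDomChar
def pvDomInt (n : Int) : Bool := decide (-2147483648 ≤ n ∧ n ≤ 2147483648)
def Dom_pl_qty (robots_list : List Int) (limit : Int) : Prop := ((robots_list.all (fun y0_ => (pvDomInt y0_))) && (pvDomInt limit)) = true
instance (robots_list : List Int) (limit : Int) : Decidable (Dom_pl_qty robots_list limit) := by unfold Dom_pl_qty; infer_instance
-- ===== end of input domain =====

-- B replaces A's nested removal scans by a single two-pointer sweep over the sorted list (same return values; neither version mutates the caller's list).

-- ===== PORT A =====
-- inner `while a < len(robots_list)` loop of A; returns (platforms, robots_list).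
-- fuel only makes the recursion structural; len(robots_list) - a steps always suffice
def plInner (limit : Int) (fuel : Nat) (L : List Int) (a platforms : Int) : Int × List Int :=
  match fuel with
  | 0 => (platforms, L)
  | fuel + 1 =>
    if a < (L.length : Int) then
      let ws := PySem.List.pyGetD L 0 0 + PySem.List.pyGetD L a 0
      if ws ≤ limit then
        let M := (PySem.List.remove? L (PySem.List.pyGetD L 0 0)).getD L
        let M' := (PySem.List.remove? M (PySem.List.pyGetD M (a-1) 0)).getD M
        plInner limit fuel M' (a+1) (platforms+1)
      else if ws > limit ∧ a = (L.length : Int) - 1 then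
        plInner limit fuel ((PySem.List.remove? L (PySem.List.pyGetD L 0 0)).getD L) (a+1) (platforms+1)
      else
        plInner limit fuel L (a+1) platforms
    else (platforms, L)

-- outer `while i < start_length-1 and len(robots_list)>1` loop of A
def plOuter (limit n : Int) (fuel : Nat) (L : List Int) (i platforms : Int) : Int × List Int :=
  match fuel with
  | 0 => (platforms, L)
  | fuel + 1 =>
    if i < n - 1 ∧ 1 < (L.length : Int) then
      let r := plInner limit L.length L 1 platforms
      plOuter limit n fuel r.2 (i+1) r.1
    else (platforms, L)

def pl_qty (robots_list : List Int) (limit : Int) : Int :=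
  let L := PySem.List.sorted robots_list (fun x => x) true
  let r := plOuter limit (L.length : Int) L.length L 0 0
  if r.2.length = 1 then r.1 + 1 else r.1

-- ===== PORT B =====
-- the `while i <= j` two-pointer loop of B over the descending sorted list s
-- (fuel makes the recursion structural; len(s) steps always suffice)
def plTwo (limit : Int) (s : List Int) (fuel : Nat) (i j platforms : Int) : Int :=
  match fuel with
  | 0 => platforms
  | fuel + 1 =>
    if i ≤ j then
      let j' := if i < j ∧ PySem.List.pyGetD s i 0 + PySem.List.pyGetD s j 0 ≤ limit then j - 1 else j
      plTwo limit s fuel (i+1) j' (platforms+1)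
    else platforms

def pl_qty_alt (robots_list : List Int) (limit : Int) : Int :=
  let s := PySem.List.sorted robots_list (fun x => x) true
  plTwo limit s s.length 0 ((s.length : Int) - 1) 0

-- ===== PRECONDITION & SPEC =====
def Spec_pl_qty (robots_list : List Int) (limit : Int) (out : Int) : Prop := out = pl_qty_alt robots_list limit
instance (robots_list : List Int) (limit : Int) (out : Int) : Decidable (Spec_pl_qty robots_list limit out) := by unfold Spec_pl_qty; infer_instance

-- ===== CLAIM (what is proved, stated in full; the proofs are below) =====
def Claim_equal_pl_qty : Prop := ∀ (robots_list : List Int) (limit : Int), Dom_pl_qty robots_list limit → Spec_pl_qty robots_list limit (pl_qty robots_list limit)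

-- ===== LEMMAS AND PROOFS =====

-- both loops are measured against `fcnt`: the platform count of a DESCENDING
-- list when the heaviest robot is paired with the lightest that fits, else alone
def fcnt (limit : Int) : List Int → Int
  | [] => 0
  | [_] => 1
  | x :: y :: t =>
    if x + (y :: t).getLastD 0 ≤ limit then 1 + fcnt limit ((y :: t).dropLast)
    else 1 + fcnt limit (y :: t)
termination_by l => l.length
decreasing_by all_goals simp [List.length_dropLast]

def pvDesc (l : List Int) : Prop := l.Pairwise (fun a b => b ≤ a)

theorem fcnt_cons (limit x : Int) (rest : List Int) (h : rest ≠ []) :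
    fcnt limit (x :: rest) =
      if x + rest.getLastD 0 ≤ limit then 1 + fcnt limit rest.dropLast
      else 1 + fcnt limit rest := by
  cases rest with
  | nil => exact absurd rfl h
  | cons y t => simp only [fcnt]

theorem pvGetLastD_eq_getLast (l : List Int) (h : l ≠ []) : l.getLastD 0 = l.getLast h := by
  rw [List.getLastD_eq_getLast?, List.getLast?_eq_some_getLast h]; rfl

theorem pvGetLastD_mem (l : List Int) (h : l ≠ []) : l.getLastD 0 ∈ l := by
  rw [pvGetLastD_eq_getLast l h]; exact List.getLast_mem h

theorem pvGlast (x : Int) (r : List Int) (h : r ≠ []) :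
    (x :: r).getLastD 0 = r.getLastD 0 := by
  cases r with
  | nil => exact absurd rfl h
  | cons y t => simp

theorem pvDesc_sublist {l l' : List Int} (hs : List.Sublist l' l) (h : pvDesc l) : pvDesc l' :=
  List.Pairwise.sublist hs h

theorem pvDesc_cons {x : Int} {r : List Int} (h : pvDesc (x :: r)) :
    pvDesc r ∧ ∀ z ∈ r, z ≤ x := by
  rw [pvDesc, List.pairwise_cons] at h
  exact ⟨h.2, h.1⟩

theorem pvLastLe : ∀ {l : List Int}, pvDesc l → ∀ z ∈ l, l.getLastD 0 ≤ z := by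
  intro l
  induction l with
  | nil => intro _ z hz; simp at hz
  | cons x r ih =>
    intro h z hz
    obtain ⟨hr, hx⟩ := pvDesc_cons h
    by_cases hrn : r = []
    · subst hrn; simp at hz; simp [hz]
    · rw [pvGlast x r hrn]
      rcases List.mem_cons.mp hz with rfl | hzr
      · exact hx _ (pvGetLastD_mem r hrn)
      · exact ih hr z hzr

-- erasing the last (minimal) value of a descending list is dropLast
theorem pvEraseLast : ∀ (t : List Int), pvDesc t → t ≠ [] →
    t.erase (t.getLastD 0) = t.dropLast := by
  intro t
  induction t with
  | nil => intro _ h; exact absurd rfl h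
  | cons x r ih =>
    intro hd _
    obtain ⟨hr, hx⟩ := pvDesc_cons hd
    by_cases hrn : r = []
    · subst hrn; simp
    · rw [pvGlast x r hrn]
      by_cases hxv : x = r.getLastD 0
      · -- every element equals x; both sides are one-shorter replicates
        have hall : ∀ b ∈ x :: r, b = x := by
          intro b hb
          rcases List.mem_cons.mp hb with rfl | hbr
          · rfl
          · have h1 : b ≤ x := hx b hbr
            have h2 : r.getLastD 0 ≤ b := pvLastLe hr b hbr
            omega
        have hrep := List.eq_replicate_of_mem hall
        rw [← hxv, hrep]
        have hlen : (x :: r).length = r.length + 1 := by simp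
        rw [hlen, List.replicate_succ, List.erase_cons_head, List.dropLast_eq_take]
        simp only [List.length_cons, List.length_replicate, Nat.add_sub_cancel]
        rw [← List.replicate_succ, List.take_replicate]
        simp
      · rw [List.erase_cons_tail (by simp only [beq_iff_eq]; exact hxv), ih hr hrn,
            List.dropLast_cons_of_ne_nil hrn]

-- erasing a non-last value commutes with dropLast and keeps the last value
theorem pvEraseNe : ∀ (t : List Int) (y : Int), y ∈ t → y ≠ t.getLastD 0 →
    (t.erase y).getLastD 0 = t.getLastD 0 ∧
    (t.erase y).dropLast = t.dropLast.erase y ∧ y ∈ t.dropLast := by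
  intro t
  induction t with
  | nil => intro y hy; simp at hy
  | cons x r ih =>
    intro y hy hylast
    by_cases hrn : r = []
    · subst hrn; simp at hy; subst hy; simp at hylast
    · rw [pvGlast x r hrn] at hylast
      by_cases hx : x = y
      · subst hx
        refine ⟨?_, ?_, ?_⟩
        · rw [List.erase_cons_head, pvGlast x r hrn]
        · rw [List.erase_cons_head, List.dropLast_cons_of_ne_nil hrn,
              List.erase_cons_head]
        · rw [List.dropLast_cons_of_ne_nil hrn]; exact List.mem_cons_self
      · have hyr : y ∈ r := by
          rcases List.mem_cons.mp hy with rfl | h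
          · exact absurd rfl hx
          · exact h
        obtain ⟨e1, e2, e3⟩ := ih y hyr hylast
        have hrdne : r.dropLast ≠ [] := List.ne_nil_of_mem e3
        have hlen2 : 2 ≤ r.length := by
          have hl : r.dropLast.length = r.length - 1 := List.length_dropLast
          have h1 : 1 ≤ r.dropLast.length := List.length_pos_of_ne_nil hrdne
          omega
        have herne : r.erase y ≠ [] := by
          have hl := List.length_erase_of_mem hyr
          intro hc
          rw [hc] at hl
          simp at hl
          omega
        refine ⟨?_, ?_, ?_⟩
        · rw [List.erase_cons_tail (by simp only [beq_iff_eq]; exact hx), pvGlast x _ herne, e1,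
              pvGlast x r hrn]
        · rw [List.erase_cons_tail (by simp only [beq_iff_eq]; exact hx),
              List.dropLast_cons_of_ne_nil herne, e2,
              List.dropLast_cons_of_ne_nil hrn,
              List.erase_cons_tail (by simp only [beq_iff_eq]; exact hx)]
        · rw [List.dropLast_cons_of_ne_nil hrn]
          exact List.mem_cons_of_mem x e3

-- when every pair fits, fcnt is exactly ⌈n / 2⌉
theorem pvCeil (limit : Int) : ∀ (l : List Int), pvDesc l →
    (∀ u ∈ l, ∀ v ∈ l, u + v ≤ limit) →
    fcnt limit l = ((l.length + 1) / 2 : Nat) := by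
  intro l
  fun_induction fcnt limit l with
  | case1 => intro _ _; simp
  | case2 z => intro _ _; simp
  | case3 x y t hfit ih =>
    intro hd hb
    have hsub : List.Sublist ((y :: t).dropLast) (x :: y :: t) :=
      List.Sublist.trans (List.dropLast_sublist _) (List.sublist_cons_self x (y :: t))
    have hih := ih (pvDesc_sublist hsub hd)
      (fun u hu v hv => hb u (hsub.mem hu) v (hsub.mem hv))
    rw [hih]
    simp only [List.length_dropLast, List.length_cons]
    push_cast
    omega
  | case4 x y t hfit ih =>
    intro hd hb
    exact absurd (hb x List.mem_cons_self _ (by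
      exact List.mem_cons_of_mem x (pvGetLastD_mem (y :: t) (by simp)))) hfit

-- the exchange lemma: erasing ANY value that fits with everything counts
-- the same as erasing the minimum
theorem pvExchange (limit : Int) : ∀ (n : Nat) (t : List Int) (y : Int),
    t.length ≤ n → pvDesc t → y ∈ t → (∀ z ∈ t, y + z ≤ limit) →
    fcnt limit (t.erase y) = fcnt limit t.dropLast := by
  intro n
  induction n with
  | zero =>
    intro t y hn hd hy _
    have ht : t = [] := List.length_eq_zero_iff.mp (by omega)
    subst ht; simp at hy
  | succ n ih =>
    intro t y hn hd hy hb
    have htne : t ≠ [] := List.ne_nil_of_mem hy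
    by_cases hlast : y = t.getLastD 0
    · rw [hlast, pvEraseLast t hd htne]
    cases t with
    | nil => simp at hy
    | cons x r =>
      by_cases hx : y = x
      · -- y is the maximum: then every pair fits; both sides are ⌈(n-1)/2⌉
        subst hx
        have hall : ∀ u ∈ y :: r, ∀ v ∈ y :: r, u + v ≤ limit := by
          intro u hu v hv
          have hub : u ≤ y := by
            rcases List.mem_cons.mp hu with rfl | h
            · exact le_refl u
            · exact (pvDesc_cons hd).2 u h
          have := hb v hv
          omega
        have h1 := pvCeil limit ((y :: r).erase y)
          (pvDesc_sublist List.erase_sublist hd)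
          (fun u hu v hv => hall u (List.erase_sublist.mem hu) v (List.erase_sublist.mem hv))
        have h2 := pvCeil limit ((y :: r).dropLast)
          (pvDesc_sublist (List.dropLast_sublist _) hd)
          (fun u hu v hv => hall u ((List.dropLast_sublist _).mem hu) v ((List.dropLast_sublist _).mem hv))
        rw [h1, h2, List.length_erase_of_mem hy, List.length_dropLast]
      · have hyr : y ∈ r := by
          rcases List.mem_cons.mp hy with rfl | h
          · exact absurd rfl hx
          · exact h
        have hrne : r ≠ [] := List.ne_nil_of_mem hyr
        rw [pvGlast x r hrne] at hlast
        obtain ⟨hdr, hxmax⟩ := pvDesc_cons hd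
        obtain ⟨e1, e2, e3⟩ := pvEraseNe r y hyr hlast
        have hrdne : r.dropLast ≠ [] := List.ne_nil_of_mem e3
        have hlen2 : 2 ≤ r.length := by
          have h1 : 1 ≤ r.dropLast.length := List.length_pos_of_ne_nil hrdne
          have : r.dropLast.length = r.length - 1 := List.length_dropLast
          omega
        have herne : r.erase y ≠ [] := by
          have := List.length_erase_of_mem hyr
          intro hc; rw [hc] at this; simp at this; omega
        have hyx : y + x ≤ limit := hb x List.mem_cons_self
        -- LHS
        have hLg : x + (r.erase y).getLastD 0 ≤ limit := by
          rw [e1]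
          have := pvLastLe hdr y hyr
          omega
        have hL : fcnt limit ((x :: r).erase y) = 1 + fcnt limit (r.dropLast.erase y) := by
          rw [List.erase_cons_tail (by simp only [beq_iff_eq]; exact fun h => hx h.symm), fcnt_cons _ _ _ herne,
              if_pos hLg, e2]
        -- RHS
        have hRg : x + (r.dropLast).getLastD 0 ≤ limit := by
          have := pvLastLe (pvDesc_sublist (List.dropLast_sublist _) hdr) y e3
          omega
        have hR : fcnt limit ((x :: r).dropLast) = 1 + fcnt limit ((r.dropLast).dropLast) := by
          rw [List.dropLast_cons_of_ne_nil hrne, fcnt_cons _ _ _ hrdne, if_pos hRg]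
        rw [hL, hR]
        have := ih r.dropLast y (by simp at hn ⊢; omega)
          (pvDesc_sublist (List.dropLast_sublist _) hdr) e3
          (fun z hz => hb z (List.mem_cons_of_mem x ((List.dropLast_sublist _).mem hz)))
        rw [this]

-- A's pair step: shipping the heaviest with ANY partner that fits costs one
-- platform plus the rest
theorem pvStepPair (limit x y : Int) (rest : List Int) (hd : pvDesc (x :: rest))
    (hy : y ∈ rest) (hfit : x + y ≤ limit) :
    fcnt limit (x :: rest) = 1 + fcnt limit (rest.erase y) := by
  have hrne : rest ≠ [] := List.ne_nil_of_mem hy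
  obtain ⟨hdr, hxmax⟩ := pvDesc_cons hd
  have hg : x + rest.getLastD 0 ≤ limit := by
    have := pvLastLe hdr y hy
    omega
  rw [fcnt_cons _ _ _ hrne, if_pos hg,
      pvExchange limit rest.length rest y (le_refl _) hdr hy
        (fun z hz => by have := hxmax z hz; omega)]

-- A's single step: when the heaviest fits with nobody it goes alone
theorem pvStepLast (limit x : Int) (rest : List Int) (hrne : rest ≠ [])
    (hg : ¬ x + rest.getLastD 0 ≤ limit) :
    fcnt limit (x :: rest) = 1 + fcnt limit rest := by
  rw [fcnt_cons _ _ _ hrne, if_neg hg]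

theorem fcnt_singleton (limit x : Int) : fcnt limit [x] = 1 := by simp [fcnt]

theorem pvGetLastD_eq_getD (l : List Int) (h : l ≠ []) :
    l.getLastD 0 = l.getD (l.length - 1) 0 := by
  rw [pvGetLastD_eq_getLast l h, List.getLast_eq_getElem,
      List.getD_eq_getElem l 0 (by have := List.length_pos_of_ne_nil h; omega)]

theorem pvPyGetD_cons_pos (x : Int) (r : List Int) (a : Int) (h1 : 1 ≤ a) :
    PySem.List.pyGetD (x :: r) a 0 = r.getD (a.toNat - 1) 0 := by
  obtain ⟨m, rfl⟩ : ∃ m : Nat, a = (m : Int) := ⟨a.toNat, by omega⟩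
  rw [PySem.List.pyGetD_natCast, Int.toNat_natCast]
  match m, h1 with
  | (m' + 1), _ => simp

theorem pvPyGetD_nonneg (r : List Int) (a : Int) (h : 0 ≤ a) :
    PySem.List.pyGetD r a 0 = r.getD a.toNat 0 := by
  obtain ⟨m, rfl⟩ : ∃ m : Nat, a = (m : Int) := ⟨a.toNat, by omega⟩
  rw [PySem.List.pyGetD_natCast, Int.toNat_natCast]

theorem plInner_spec (limit : Int) : ∀ (k : Nat) (L : List Int) (a p : Int),
    ((L.length : Int) - a).toNat ≤ k → pvDesc L → 1 ≤ a →
    pvDesc (plInner limit k L a p).2 ∧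
    (plInner limit k L a p).1 + fcnt limit (plInner limit k L a p).2 = p + fcnt limit L ∧
    (plInner limit k L a p).2.length ≤ L.length ∧
    (a < (L.length : Int) → (plInner limit k L a p).2.length < L.length) := by
  intro k
  induction k with
  | zero =>
    intro L a p hk hd ha
    rw [plInner]
    exact ⟨hd, by ring, le_refl _, fun h => absurd h (by omega)⟩
  | succ k ih =>
    intro L a p hk hd ha
    by_cases hA : a < (L.length : Int)
    · cases L with
      | nil => simp at hA; omega
      | cons x rest =>
        have hlenc : ((x :: rest).length : Int) = (rest.length : Int) + 1 := by simp
        have hr1 : 1 ≤ rest.length := by omega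
        have hrne : rest ≠ [] := by
          intro hc; rw [hc] at hr1; simp at hr1
        obtain ⟨hdr, hxmax⟩ := pvDesc_cons hd
        have hx0 : PySem.List.pyGetD (x :: rest) 0 0 = x :=
          PySem.List.pyGetD_zero_cons x rest 0
        have hga : PySem.List.pyGetD (x :: rest) a 0 = rest.getD (a.toNat - 1) 0 :=
          pvPyGetD_cons_pos x rest a ha
        set y := rest.getD (a.toNat - 1) 0 with hy
        have hyn : a.toNat - 1 < rest.length := by omega
        have hymem : y ∈ rest := by
          rw [hy, List.getD_eq_getElem rest 0 hyn]
          exact List.getElem_mem hyn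
        have hM : (PySem.List.remove? (x :: rest) x).getD (x :: rest) = rest := by
          rw [PySem.List.remove?_cons_self]
          rfl
        have hm2 : PySem.List.pyGetD rest (a - 1) 0 = y := by
          rw [pvPyGetD_nonneg rest (a - 1) (by omega), hy]
          congr 1
          omega
        have hM' : (PySem.List.remove? rest y).getD rest = rest.erase y := by
          rw [PySem.List.remove?_eq_some_erase rest y hymem]
          rfl
        have hel : (rest.erase y).length = rest.length - 1 :=
          List.length_erase_of_mem hymem
        rw [plInner, if_pos hA]
        simp only [hx0, hga, hM, hm2, hM']
        by_cases hws : x + y ≤ limit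
        · rw [if_pos hws]
          obtain ⟨c1, c2, c3, _⟩ := ih (rest.erase y) (a+1) (p+1) (by omega)
            (pvDesc_sublist List.erase_sublist hdr) (by omega)
          refine ⟨c1, ?_, by simp; omega, fun _ => by simp; omega⟩
          rw [c2, pvStepPair limit x y rest hd hymem hws]
          ring
        · rw [if_neg hws]
          by_cases hA2 : x + y > limit ∧ a = ((x :: rest).length : Int) - 1
          · rw [if_pos hA2]
            have hlastv : rest.getLastD 0 = y := by
              rw [pvGetLastD_eq_getD rest hrne, hy]
              congr 1
              omega
            obtain ⟨c1, c2, c3, _⟩ := ih rest (a+1) (p+1) (by omega) hdr (by omega)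
            refine ⟨c1, ?_, by simp; omega, fun _ => by simp; omega⟩
            rw [c2, pvStepLast limit x rest hrne (by rw [hlastv]; exact hws)]
            ring
          · rw [if_neg hA2]
            have hane : a ≠ ((x :: rest).length : Int) - 1 := by
              intro hc
              exact hA2 ⟨by omega, hc⟩
            obtain ⟨c1, c2, c3, c4⟩ := ih (x :: rest) (a+1) p (by omega) hd (by omega)
            exact ⟨c1, c2, c3, fun _ => c4 (by omega)⟩
    · rw [plInner, if_neg hA]
      exact ⟨hd, by ring, le_refl _, fun h => absurd h hA⟩

theorem plOuter_spec (limit : Int) : ∀ (k : Nat) (n : Int) (L : List Int) (i p : Int),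
    (n - 1 - i).toNat ≤ k → pvDesc L → (L.length : Int) ≤ n - i →
    (if (plOuter limit n k L i p).2.length = 1 then (plOuter limit n k L i p).1 + 1
     else (plOuter limit n k L i p).1) = p + fcnt limit L := by
  intro k
  induction k with
  | zero =>
    intro n L i p hk hd hlen
    rw [plOuter]
    match L, hlen with
    | [], _ => simp [fcnt]
    | [x], _ => simp [fcnt_singleton]
    | x :: y :: t, hlen => simp at hlen; omega
  | succ k ih =>
    intro n L i p hk hd hlen
    rw [plOuter]
    by_cases hg : i < n - 1 ∧ 1 < (L.length : Int)
    · rw [if_pos hg]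
      obtain ⟨hd', hf, hle, hstrict⟩ := plInner_spec limit L.length L 1 p (by omega) hd (le_refl 1)
      have hlt : (plInner limit L.length L 1 p).2.length < L.length := hstrict (by omega)
      have := ih n (plInner limit L.length L 1 p).2 (i+1) (plInner limit L.length L 1 p).1
        (by omega) hd' (by omega)
      rw [this, hf]
    · rw [if_neg hg]
      have hle1 : L.length ≤ 1 := by
        rcases not_and_or.mp hg with h1 | h2
        · omega
        · omega
      match L, hle1 with
      | [], _ => simp [fcnt]
      | [x], _ => simp [fcnt_singleton]

theorem pvSegLast (s : List Int) (a k : Nat) (h : a + k < s.length) :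
    ((s.drop a).take (k+1)).getLastD 0 = s[a+k] := by
  have hlen : ((s.drop a).take (k+1)).length = k+1 := by
    simp only [List.length_take, List.length_drop]
    omega
  have hne : (s.drop a).take (k+1) ≠ [] := by
    intro hc; rw [hc] at hlen; simp at hlen
  rw [pvGetLastD_eq_getLast _ hne, List.getLast_eq_getElem]
  simp only [List.getElem_take, List.getElem_drop]
  congr 1
  omega

theorem plTwo_spec (limit : Int) : ∀ (k : Nat) (s : List Int) (i j p : Int),
    (j + 1 - i).toNat ≤ k → 0 ≤ i → j < (s.length : Int) →
    plTwo limit s k i j p = p + fcnt limit ((s.drop i.toNat).take (j + 1 - i).toNat) := by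
  intro k
  induction k with
  | zero =>
    intro s i j p hk h0 hj
    rw [plTwo]
    have h1 : (j + 1 - i).toNat = 0 := by omega
    rw [h1]
    simp [fcnt]
  | succ k ih =>
    intro s i j p hk h0 hj
    rw [plTwo]
    by_cases hij : i ≤ j
    · rw [if_pos hij]
      have hin : i.toNat < s.length := by omega
      have hjn : j.toNat < s.length := by omega
      have hgi : PySem.List.pyGetD s i 0 = s[i.toNat]'hin :=
        PySem.List.pyGetD_eq_getElem (i := i) s 0 (by omega) (by omega)
      have hgj : PySem.List.pyGetD s j 0 = s[j.toNat]'hjn :=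
        PySem.List.pyGetD_eq_getElem (i := j) s 0 (by omega) (by omega)
      have hi1 : (i+1).toNat = i.toNat + 1 := by omega
      have hseg : (s.drop i.toNat).take (j + 1 - i).toNat =
          s[i.toNat] :: ((s.drop (i.toNat + 1)).take (j - i).toNat) := by
        rw [List.drop_eq_getElem_cons hin]
        have h1 : (j + 1 - i).toNat = (j - i).toNat + 1 := by omega
        rw [h1, List.take_succ_cons]
      by_cases hlt : i < j
      · have hrne : (s.drop (i.toNat + 1)).take (j - i).toNat ≠ [] := by
          have : ((s.drop (i.toNat + 1)).take (j - i).toNat).length = (j - i).toNat := by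
            simp only [List.length_take, List.length_drop]; omega
          intro hc; rw [hc] at this; simp at this; omega
        have hlast : ((s.drop (i.toNat + 1)).take (j - i).toNat).getLastD 0 = s[j.toNat] := by
          have h1 : (j - i).toNat = ((j - i).toNat - 1) + 1 := by omega
          rw [h1, pvSegLast s (i.toNat + 1) ((j - i).toNat - 1) (by omega)]
          congr 1
          omega
        have hrlen : ((s.drop (i.toNat + 1)).take (j - i).toNat).length = (j - i).toNat := by
          simp only [List.length_take, List.length_drop]; omega
        have hrdl : ((s.drop (i.toNat + 1)).take (j - i).toNat).dropLast =
            (s.drop (i.toNat + 1)).take ((j - i).toNat - 1) := by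
          rw [List.dropLast_eq_take, hrlen, List.take_take]
          congr 1
          omega
        rw [hseg, fcnt_cons _ _ _ hrne, hlast]
        by_cases hfit : s[i.toNat] + s[j.toNat] ≤ limit
        · have hgpos : i < j ∧ PySem.List.pyGetD s i 0 + PySem.List.pyGetD s j 0 ≤ limit := by
            rw [hgi, hgj]; exact ⟨hlt, hfit⟩
          rw [if_pos hgpos, if_pos hfit, hrdl]
          have hrec := ih s (i+1) (j-1) (p+1) (by omega) (by omega) (by omega)
          rw [hrec, hi1]
          have h2 : (j - 1 + 1 - (i + 1)).toNat = (j - i).toNat - 1 := by omega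
          rw [h2]
          ring
        · have hgneg : ¬(i < j ∧ PySem.List.pyGetD s i 0 + PySem.List.pyGetD s j 0 ≤ limit) := by
            rw [hgi, hgj]; intro hc; exact hfit hc.2
          rw [if_neg hgneg, if_neg hfit]
          have hrec := ih s (i+1) j (p+1) (by omega) (by omega) (by omega)
          rw [hrec, hi1]
          have h2 : (j + 1 - (i + 1)).toNat = (j - i).toNat := by omega
          rw [h2]
          ring
      · -- i = j: one robot left, shipped alone
        have hieq : i = j := by omega
        have hgneg : ¬(i < j ∧ PySem.List.pyGetD s i 0 + PySem.List.pyGetD s j 0 ≤ limit) := by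
          intro hc; exact hlt hc.1
        rw [if_neg hgneg]
        have hrec := ih s (i+1) j (p+1) (by omega) (by omega) (by omega)
        rw [hrec, hseg]
        have h0' : (j - i).toNat = 0 := by omega
        have h1' : (j + 1 - (i + 1)).toNat = 0 := by omega
        rw [h0', h1']
        simp [fcnt, fcnt_singleton]
    · rw [if_neg hij]
      have h1 : (j + 1 - i).toNat = 0 := by omega
      rw [h1]
      simp [fcnt]

theorem pvSorted_desc (xs : List Int) :
    pvDesc (PySem.List.sorted xs (fun x => x) true) := by
  have := PySem.List.sorted_pairwise_rev (xs := xs) (key := fun x => x)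
  exact this

-- ===== VERDICT (by name: the statement is the Claim_ definition above) =====
theorem pl_qty_spec : Claim_equal_pl_qty := by
  intro robots_list limit _
  unfold Spec_pl_qty pl_qty pl_qty_alt
  set L := PySem.List.sorted robots_list (fun x => x) true with hL
  have hd := pvSorted_desc robots_list
  have hA := plOuter_spec limit L.length (L.length : Int) L 0 0 (by omega) hd (by omega)
  have hB := plTwo_spec limit L.length L 0 ((L.length : Int) - 1) 0 (by omega) (le_refl 0) (by omega)
  have h1 : ((L.length : Int) - 1 + 1 - 0).toNat = L.length := by omega
  rw [h1] at hB
  simp only [Int.toNat_zero, List.drop_zero, List.take_length] at hB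
  rw [hB]
  exact hA
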